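-- pv_equiv track=rewrite | github.com/tiendv/MCOCR2021 | Task2/submit_task2/e2e/mc_ocr_rivf2020/post_processing/backup/submit_103.py | print_output
-- ===== SOURCE A (Python) =====
-- def print_output(output_dict):
--     list_value = []
--     list_field = []
--     for key, value in output_dict.items():
--         list_value.append(value[0])
--         list_field.append(value[1])
--
--     result_value = '|||'.join(list_value)
--     result_field = '|||'.join(list_field)
--
--     return result_value, result_field
-- ===== SOURCE B (Python) =====
-- def print_output(output_dict):
--     result_value = ''
--     result_field = ''
--     first = True
--     for v in output_dict.values():
--         if first:
--             result_value = v[0]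
--             result_field = v[1]
--             first = False
--         else:
--             result_value += '|||' + v[0]
--             result_field += '|||' + v[1]
--     return result_value, result_field
-- ===== Notes on version B (the rewrite author's own statement) =====
-- stated objective: alternative
-- what changed: Replaces the two parallel accumulator lists plus two str.join calls with a single pass that builds both result strings directly, inserting the '|||' separator inline via a first-element flag (no intermediate lists, no join).
import Mathlib
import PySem

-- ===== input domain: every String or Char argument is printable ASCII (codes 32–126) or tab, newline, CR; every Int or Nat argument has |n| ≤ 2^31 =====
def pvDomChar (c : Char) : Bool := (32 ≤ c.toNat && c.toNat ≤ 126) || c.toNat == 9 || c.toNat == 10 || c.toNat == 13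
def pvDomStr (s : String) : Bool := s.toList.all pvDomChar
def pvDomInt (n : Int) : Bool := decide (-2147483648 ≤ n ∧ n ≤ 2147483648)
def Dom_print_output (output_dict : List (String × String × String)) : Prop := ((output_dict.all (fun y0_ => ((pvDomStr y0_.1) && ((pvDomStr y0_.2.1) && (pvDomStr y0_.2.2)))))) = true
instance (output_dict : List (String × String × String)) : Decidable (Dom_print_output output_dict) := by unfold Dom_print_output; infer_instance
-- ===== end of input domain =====

-- B replaces A's collect-two-lists-then-join with a single recursive descent that
-- assembles both result strings directly; objective: alternative (same cost).

-- ===== PORT A =====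
def print_output (output_dict : List (String × String × String)) : String × String :=
  -- for key, value in output_dict.items(): list_value.append(value[0]); list_field.append(value[1])
  let lists := output_dict.foldl
    (fun (acc : List String × List String) kv =>
      (acc.1 ++ [kv.2.1], acc.2 ++ [kv.2.2]))
    ([], [])
  let result_value := PySem.Str.join "|||" lists.1
  let result_field := PySem.Str.join "|||" lists.2
  (result_value, result_field)

-- ===== PORT B =====
-- single pass of Source B: state (result_value, result_field, first); Python's str '+'/'+='
-- ported exactly as code-point list append (strings handled via .toList).
def pvStepB (acc : List Char × List Char × Bool) (v : String × String × String) :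
    List Char × List Char × Bool :=
  if acc.2.2 then (v.2.1.toList, v.2.2.toList, false)
  else (acc.1 ++ "|||".toList ++ v.2.1.toList, acc.2.1 ++ "|||".toList ++ v.2.2.toList, false)

def print_output_alt (output_dict : List (String × String × String)) : String × String :=
  let r := output_dict.foldl pvStepB ([], [], true)
  (String.ofList r.1, String.ofList r.2.1)

-- ===== PRECONDITION & SPEC =====
def Spec_print_output (output_dict : List (String × String × String)) (out : String × String) : Prop := out = print_output_alt output_dict
instance (output_dict : List (String × String × String)) (out : String × String) : Decidable (Spec_print_output output_dict out) := by unfold Spec_print_output; infer_instance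

-- ===== CLAIM (what is proved, stated in full; the proofs are below) =====
def Claim_equal_print_output : Prop := ∀ (output_dict : List (String × String × String)), Dom_print_output output_dict → Spec_print_output output_dict (print_output output_dict)

-- ===== LEMMAS AND PROOFS =====

theorem pv_foldl_pairs (xs : List (String × String × String)) (a b : List String) :
    xs.foldl (fun (acc : List String × List String) kv =>
      (acc.1 ++ [kv.2.1], acc.2 ++ [kv.2.2])) (a, b)
    = (a ++ xs.map (fun kv => kv.2.1), b ++ xs.map (fun kv => kv.2.2)) := by
  induction xs generalizing a b with
  | nil => simp
  | cons x xs ih => simp [List.foldl, ih]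

theorem pv_foldl_stepB (xs : List (String × String × String)) (p q : List Char) :
    xs.foldl pvStepB (p, q, false)
    = (p ++ xs.flatMap (fun v => "|||".toList ++ v.2.1.toList),
       q ++ xs.flatMap (fun v => "|||".toList ++ v.2.2.toList), false) := by
  induction xs generalizing p q with
  | nil => simp
  | cons x xs ih => simp [List.foldl, pvStepB, ih]

theorem pv_join_eq_flatMap (sep a : List Char) (rest : List (List Char)) :
    PySem.Chars.join sep (a :: rest)
    = a ++ rest.flatMap (fun c => sep ++ c) := by
  induction rest generalizing a with
  | nil => simp [PySem.Chars.join_singleton]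
  | cons b bs ih =>
    rw [PySem.Chars.join_cons_cons, ih b]
    simp

theorem pv_str_ext (s t : String) (h : s.toList = t.toList) : s = t := by
  have := congrArg String.ofList h
  simpa using this

-- ===== VERDICT (by name: the statement is the Claim_ definition above) =====
theorem print_output_spec : Claim_equal_print_output := by
  intro xs _
  unfold Spec_print_output print_output print_output_alt
  cases xs with
  | nil => simp [PySem.Str.join]
  | cons x xs =>
    have hstep : List.foldl pvStepB ([], [], true) (x :: xs)
        = List.foldl pvStepB (x.2.1.toList, x.2.2.toList, false) xs := by
      simp [pvStepB]
    simp only [pv_foldl_pairs, List.nil_append, hstep, pv_foldl_stepB]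
    refine Prod.ext ?_ ?_ <;>
    · apply pv_str_ext
      simp [PySem.Str.toList_join, pv_join_eq_flatMap, List.flatMap_map, Function.comp_def]
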